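-- pv_equiv track=rewrite | github.com/tjstarfighter-cmd/2D6-Dungeon-App | scripts/polish_core_rules.py | find_table_region_end
-- ===== SOURCE A (Python) =====
-- PROSE_PARA_THRESHOLD = 90
--
-- def find_table_region_end(lines: list[str], start: int) -> int:
--     """
--     Given the index of the line right after a `### ... Table` heading,
--     walk forward and return the exclusive end index of the fragmented
--     table body. The body ends at:
--       - the next heading line (#, ##, ###, ####, etc.), OR
--       - a non-empty paragraph with > PROSE_PARA_THRESHOLD chars, OR
--       - end of file.
--
--     Each "paragraph" is a maximal run of non-blank lines.
--     """
--     i = start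
--     n = len(lines)
--     while i < n:
--         line = lines[i]
--         if line.startswith("#"):
--             return i
--         if not line.strip():
--             i += 1
--             continue
--         # Collect the contiguous paragraph (non-blank lines).
--         j = i
--         para_parts: list[str] = []
--         while j < n and lines[j].strip() and not lines[j].startswith("#"):
--             para_parts.append(lines[j])
--             j += 1
--         para_text = " ".join(p.strip() for p in para_parts)
--         # Skip generator markers/comments — they belong to a previous run
--         # and we should pass through them transparently.
--         if para_text.startswith("<!--") and para_text.endswith("-->"):
--             i = j
--             continue
--         if len(para_text) > PROSE_PARA_THRESHOLD:
--             return i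
--         i = j
--     return n
-- ===== SOURCE B (Python) =====
-- PROSE_PARA_THRESHOLD = 90
--
-- def find_table_region_end(lines: list[str], start: int) -> int:
--     """Single flat pass with a pending-paragraph accumulator instead of
--     nested scans: the paragraph is finalized on blank/heading/EOF."""
--     n = len(lines)
--     pend = None  # None or (para_start, [stripped parts])
--     i = start
--     while i < n:
--         line = lines[i]
--         if line.startswith("#"):
--             if pend is not None:
--                 p, parts = pend
--                 text = " ".join(parts)
--                 if not (text.startswith("<!--") and text.endswith("-->")) \
--                         and len(text) > PROSE_PARA_THRESHOLD:
--                     return p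
--             return i
--         if not line.strip():
--             if pend is not None:
--                 p, parts = pend
--                 text = " ".join(parts)
--                 if not (text.startswith("<!--") and text.endswith("-->")) \
--                         and len(text) > PROSE_PARA_THRESHOLD:
--                     return p
--                 pend = None
--             i += 1
--             continue
--         if pend is None:
--             pend = (i, [line.strip()])
--         else:
--             pend[1].append(line.strip())
--         i += 1
--     if pend is not None:
--         p, parts = pend
--         text = " ".join(parts)
--         if not (text.startswith("<!--") and text.endswith("-->")) \
--                 and len(text) > PROSE_PARA_THRESHOLD:
--             return p
--     return n
-- ===== Notes on version B (the rewrite author's own statement) =====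
-- stated objective: alternative
-- what changed: Replaced A's nested scans (outer walk plus an inner paragraph-collecting loop that re-reads the lines) by a single flat pass over the lines that carries a pending-paragraph accumulator (start index + stripped parts) finalized on blank/heading/EOF.
import Mathlib
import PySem

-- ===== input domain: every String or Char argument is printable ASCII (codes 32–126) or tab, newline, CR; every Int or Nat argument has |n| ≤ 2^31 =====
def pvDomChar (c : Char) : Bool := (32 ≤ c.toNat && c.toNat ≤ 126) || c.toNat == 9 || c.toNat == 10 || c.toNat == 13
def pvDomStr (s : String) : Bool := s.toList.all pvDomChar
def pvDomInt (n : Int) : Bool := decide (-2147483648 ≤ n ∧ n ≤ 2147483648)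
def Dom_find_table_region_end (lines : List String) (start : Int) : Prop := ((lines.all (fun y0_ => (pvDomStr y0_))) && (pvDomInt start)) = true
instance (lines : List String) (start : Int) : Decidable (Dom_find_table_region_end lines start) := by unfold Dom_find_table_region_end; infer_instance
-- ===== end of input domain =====

-- B replaces A's nested paragraph-collecting scan by a single flat pass with a
-- pending-paragraph accumulator finalized on blank/heading/EOF (objective: alternative decomposition).

-- ===== PORT A =====
-- inner while loop: collect the contiguous paragraph (non-blank, non-heading lines)
def ftreInner (lines : List String) (n : Int) : Int → List String → Nat → Int × List String
  | j, parts, 0 => (j, parts)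
  | j, parts, fuel + 1 =>
    if j < n ∧ PySem.Str.strip (PySem.List.pyGetD lines j "") ≠ "" ∧
        ¬ (PySem.Str.startswith (PySem.List.pyGetD lines j "") "#" = true) then
      ftreInner lines n (j + 1) (parts ++ [PySem.List.pyGetD lines j ""]) fuel
    else (j, parts)

-- outer while loop of A (fuel = remaining line count + 1, enough since i strictly increases)
def ftreOuter (lines : List String) (n : Int) : Int → Nat → Int
  | _, 0 => 0
  | i, fuel + 1 =>
    if i < n then
      let line := PySem.List.pyGetD lines i ""
      if PySem.Str.startswith line "#" = true then i
      else if PySem.Str.strip line = "" then ftreOuter lines n (i + 1) fuel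
      else
        let r := ftreInner lines n i [] (n - i).toNat
        let para := PySem.Str.join " " (r.2.map PySem.Str.strip)
        if PySem.Str.startswith para "<!--" = true ∧ PySem.Str.endswith para "-->" = true then
          ftreOuter lines n r.1 fuel
        else if 90 < PySem.Str.len para then i
        else ftreOuter lines n r.1 fuel
    else n

def find_table_region_end (lines : List String) (start : Int) : Int :=
  ftreOuter lines (PySem.List.len lines) start ((PySem.List.len lines - start).toNat + 1)

-- ===== PORT B =====
-- single flat pass; pend = none or (paragraph start, stripped parts so far)
def ftreAltLoop (lines : List String) (n : Int) : Int → Option (Int × List String) → Nat → Int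
  | _, _, 0 => 0
  | i, pend, fuel + 1 =>
    if i < n then
      let line := PySem.List.pyGetD lines i ""
      if PySem.Str.startswith line "#" = true then
        match pend with
        | some (p, parts) =>
          let text := PySem.Str.join " " parts
          if ¬ (PySem.Str.startswith text "<!--" = true ∧ PySem.Str.endswith text "-->" = true) ∧
              90 < PySem.Str.len text then p
          else i
        | none => i
      else if PySem.Str.strip line = "" then
        match pend with
        | some (p, parts) =>
          let text := PySem.Str.join " " parts
          if ¬ (PySem.Str.startswith text "<!--" = true ∧ PySem.Str.endswith text "-->" = true) ∧
              90 < PySem.Str.len text then p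
          else ftreAltLoop lines n (i + 1) none fuel
        | none => ftreAltLoop lines n (i + 1) none fuel
      else
        match pend with
        | none => ftreAltLoop lines n (i + 1) (some (i, [PySem.Str.strip line])) fuel
        | some (p, parts) => ftreAltLoop lines n (i + 1) (some (p, parts ++ [PySem.Str.strip line])) fuel
    else
      match pend with
      | some (p, parts) =>
        let text := PySem.Str.join " " parts
        if ¬ (PySem.Str.startswith text "<!--" = true ∧ PySem.Str.endswith text "-->" = true) ∧
            90 < PySem.Str.len text then p
        else n
      | none => n

def find_table_region_end_alt (lines : List String) (start : Int) : Int :=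
  ftreAltLoop lines (PySem.List.len lines) start none ((PySem.List.len lines - start).toNat + 1)

-- ===== PRECONDITION & SPEC =====
-- Pre_ excludes exactly the inputs where the Python A raises IndexError:
-- start < -len(lines), where lines[start] is out of range even after wraparound.
def Pre_find_table_region_end (lines : List String) (start : Int) : Prop :=
  -(lines.length : Int) ≤ start
instance (lines : List String) (start : Int) : Decidable (Pre_find_table_region_end lines start) := by
  unfold Pre_find_table_region_end; infer_instance

def pvWitness_find_table_region_end : List String × Int :=
  (["intro text", "", "## Table", "1 | one"], 0)

def Spec_find_table_region_end (lines : List String) (start : Int) (out : Int) : Prop :=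
  out = find_table_region_end_alt lines start
instance (lines : List String) (start : Int) (out : Int) : Decidable (Spec_find_table_region_end lines start out) := by
  unfold Spec_find_table_region_end; infer_instance

-- ===== CLAIM (what is proved, stated in full; the proofs are below) =====
def Claim_equal_find_table_region_end : Prop := ∀ (lines : List String) (start : Int), Dom_find_table_region_end lines start → Pre_find_table_region_end lines start → Spec_find_table_region_end lines start (find_table_region_end lines start)

-- ===== LEMMAS AND PROOFS =====

-- canonical fuel for the B loop (proof-only helper)
def altRun (lines : List String) (n i : Int) (pend : Option (Int × List String)) : Int :=
  ftreAltLoop lines n i pend ((n - i).toNat + 1)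

theorem altLoop_fuel (lines : List String) (n : Int) :
    ∀ f g i pend, (n - i).toNat < f → (n - i).toNat < g →
      ftreAltLoop lines n i pend f = ftreAltLoop lines n i pend g := by
  intro f
  induction f with
  | zero => intro g i pend hf hg; omega
  | succ f ih =>
    intro g i pend hf hg
    cases g with
    | zero => omega
    | succ g =>
      simp only [ftreAltLoop]
      by_cases hi : i < n
      · have h1 : (n - (i+1)).toNat < f := by omega
        have h2 : (n - (i+1)).toNat < g := by omega
        simp only [hi, if_true]
        cases pend with
        | none =>
          try dsimp only
          split_ifs <;> first | rfl | exact ih g _ _ h1 h2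
        | some pp =>
          obtain ⟨p, parts⟩ := pp
          try dsimp only
          split_ifs <;> first | rfl | exact ih g _ _ h1 h2
      · simp only [hi, if_false]
theorem altLoop_eq_altRun (lines : List String) (n : Int) (i : Int) (pend : Option (Int × List String))
    (f : Nat) (hf : (n - i).toNat < f) :
    ftreAltLoop lines n i pend f = altRun lines n i pend :=
  altLoop_fuel lines n f ((n - i).toNat + 1) i pend hf (by omega)

theorem innerGe (lines : List String) (n : Int) :
    ∀ fuel j parts, j ≤ (ftreInner lines n j parts fuel).1 := by
  intro fuel
  induction fuel with
  | zero => intro j parts; simp [ftreInner]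
  | succ f ih =>
    intro j parts
    simp only [ftreInner]
    split_ifs with h
    · have := ih (j + 1) (parts ++ [PySem.List.pyGetD lines j ""])
      omega
    · simp


theorem bridge (lines : List String) (n : Int) :
    ∀ k j rawparts p, (n - j).toNat ≤ k →
      altRun lines n j (some (p, rawparts.map PySem.Str.strip)) =
        (let r := ftreInner lines n j rawparts k
         let text := PySem.Str.join " " (r.2.map PySem.Str.strip)
         if ¬ (PySem.Str.startswith text "<!--" = true ∧ PySem.Str.endswith text "-->" = true) ∧
             90 < PySem.Str.len text then p
         else altRun lines n r.1 none) := by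
  intro k
  induction k with
  | zero =>
    intro j rawparts p hk
    have hj : ¬ j < n := by omega
    have hA : altRun lines n j none = n := by
      rw [altRun]; simp only [ftreAltLoop, hj, if_false]
    simp only [ftreInner]
    conv_lhs => rw [altRun]
    simp only [ftreAltLoop, hj, if_false]
    rw [hA]
  | succ k ih =>
    intro j rawparts p hk
    by_cases hj : j < n
    · set line := PySem.List.pyGetD lines j "" with hline
      by_cases hcond : PySem.Str.strip line ≠ "" ∧ ¬ (PySem.Str.startswith line "#" = true)
      · -- paragraph continues
        have hstep : ftreInner lines n j rawparts (k + 1)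
            = ftreInner lines n (j + 1) (rawparts ++ [line]) k := by
          simp only [ftreInner]
          rw [if_pos ⟨hj, hcond.1, hcond.2⟩]
        rw [hstep]
        have hB : altRun lines n j (some (p, rawparts.map PySem.Str.strip))
            = altRun lines n (j + 1) (some (p, (rawparts ++ [line]).map PySem.Str.strip)) := by
          conv_lhs => rw [altRun]
          simp only [ftreAltLoop, hj, if_true]
          rw [if_neg hcond.2, if_neg (by simpa using hcond.1)]
          try dsimp only
          rw [altLoop_eq_altRun lines n (j+1) _ _ (by omega)]
          simp only [List.map_append, List.map_cons, List.map_nil]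
          rfl
        rw [hB]
        exact ih (j + 1) (rawparts ++ [line]) p (by omega)
      · -- paragraph stops at j: heading or blank
        have hstop : ftreInner lines n j rawparts (k + 1) = (j, rawparts) := by
          simp only [ftreInner]
          rw [if_neg (by tauto)]
        rw [hstop]
        by_cases hh : PySem.Str.startswith line "#" = true
        · -- heading
          have hA : altRun lines n j none = j := by
            rw [altRun]; simp only [ftreAltLoop, hj, if_true]; rw [if_pos hh]
          conv_lhs => rw [altRun]
          simp only [ftreAltLoop, hj, if_true]
          rw [if_pos hh]
          rw [hA]
        · -- blank
          have hb : PySem.Str.strip line = "" := by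
            by_contra hb; exact hcond ⟨hb, hh⟩
          have hA : altRun lines n j none = altRun lines n (j + 1) none := by
            rw [altRun]; simp only [ftreAltLoop, hj, if_true]
            rw [if_neg hh, if_pos hb]
            exact altLoop_eq_altRun lines n (j+1) none _ (by omega)
          conv_lhs => rw [altRun]
          simp only [ftreAltLoop, hj, if_true]
          rw [if_neg hh, if_pos hb]
          rw [hA]
          rw [altLoop_eq_altRun lines n (j+1) none _ (by omega)]
    · -- j ≥ n
      have hstop : ftreInner lines n j rawparts (k + 1) = (j, rawparts) := by
        simp only [ftreInner]
        rw [if_neg (by tauto)]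
      have hA : altRun lines n j none = n := by
        rw [altRun]; simp only [ftreAltLoop, hj, if_false]
      rw [hstop]
      conv_lhs => rw [altRun]
      simp only [ftreAltLoop, hj, if_false]
      rw [hA]
set_option maxHeartbeats 1000000 in
theorem main_eq (lines : List String) (n : Int) :
    ∀ d i fa, (n - i).toNat ≤ d → (n - i).toNat < fa →
      ftreOuter lines n i fa = altRun lines n i none := by
  intro d
  induction d with
  | zero =>
    intro i fa h1 h2
    have hi : ¬ i < n := by omega
    cases fa with
    | zero => omega
    | succ f =>
      simp only [ftreOuter, hi, if_false]
      rw [altRun]; simp only [ftreAltLoop, hi, if_false]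
  | succ d ih =>
    intro i fa h1 h2
    cases fa with
    | zero => omega
    | succ f =>
      by_cases hi : i < n
      · simp only [ftreOuter, hi, if_true]
        set line := PySem.List.pyGetD lines i "" with hline
        by_cases hh : PySem.Str.startswith line "#" = true
        · rw [if_pos hh]
          have hA : altRun lines n i none = i := by
            rw [altRun]; simp only [ftreAltLoop, hi, if_true]; rw [if_pos hh]
          rw [hA]
        · by_cases hb : PySem.Str.strip line = ""
          · rw [if_neg hh, if_pos hb]
            have hA : altRun lines n i none = altRun lines n (i + 1) none := by
              rw [altRun]; simp only [ftreAltLoop, hi, if_true]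
              rw [if_neg hh, if_pos hb]
              exact altLoop_eq_altRun lines n (i+1) none _ (by omega)
            rw [hA]
            exact ih (i + 1) f (by omega) (by omega)
          · rw [if_neg hh, if_neg hb]
            have hm : (n - i).toNat = (n - (i + 1)).toNat + 1 := by omega
            have hstep : ftreInner lines n i [] (n - i).toNat
                = ftreInner lines n (i + 1) [line] ((n - (i + 1)).toNat) := by
              rw [hm]
              simp only [ftreInner]
              rw [if_pos ⟨hi, hb, hh⟩]
              rfl
            rw [hstep]
            have hB : altRun lines n i none
                = altRun lines n (i + 1) (some (i, ([line] : List String).map PySem.Str.strip)) := by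
              rw [altRun]; simp only [ftreAltLoop, hi, if_true]
              rw [if_neg hh, if_neg hb]
              rw [altLoop_eq_altRun lines n (i+1) _ _ (by omega)]
              rfl
            have hbr := bridge lines n ((n - (i + 1)).toNat) (i + 1) [line] i (le_refl _)
            have hge := innerGe lines n ((n - (i + 1)).toNat) (i + 1) [line]
            rw [hB, hbr]
            dsimp only
            generalize hgen : ftreInner lines n (i + 1) [line] ((n - (i + 1)).toNat) = r at *
            obtain ⟨j', parts'⟩ := r
            dsimp only at hge ⊢
            have hout : ftreOuter lines n j' f = altRun lines n j' none :=
              ih j' f (by omega) (by omega)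
            rw [hout]
            by_cases hc1 : PySem.Str.startswith (PySem.Str.join " " (parts'.map PySem.Str.strip)) "<!--" = true ∧
                PySem.Str.endswith (PySem.Str.join " " (parts'.map PySem.Str.strip)) "-->" = true
            · rw [if_pos hc1, if_neg (by tauto)]
            · by_cases hc2 : 90 < PySem.Str.len (PySem.Str.join " " (parts'.map PySem.Str.strip))
              · rw [if_neg hc1, if_pos hc2, if_pos ⟨hc1, hc2⟩]
              · rw [if_neg hc1, if_neg hc2, if_neg (by tauto)]
      · simp only [ftreOuter, hi, if_false]
        rw [altRun]; simp only [ftreAltLoop, hi, if_false]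

-- ===== VERDICT (by name: the statement is the Claim_ definition above) =====
theorem find_table_region_end_spec : Claim_equal_find_table_region_end := by
  intro lines start _ _
  unfold Spec_find_table_region_end find_table_region_end find_table_region_end_alt
  rw [altLoop_eq_altRun lines _ start none _ (by omega)]
  exact main_eq lines _ ((PySem.List.len lines - start).toNat) start _ (le_refl _) (by omega)
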